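-- pv_equiv track=rewrite | github.com/ewdhp/molecular_physics | electronic_configurations.py | get_orbital_box_diagram
-- ===== SOURCE A (Python) =====
-- def get_orbital_type(orbital_str):
--     """Extract orbital type (s, p, d, f) from orbital string like '3d'."""
--     return orbital_str[-1]
--
-- def get_orbital_box_diagram(orbital, n_electrons):
--     """
--     Generate orbital box diagram following Hund's rule.
--
--     Parameters:
--     -----------
--     orbital : str
--         Orbital name (e.g., '2p', '3d')
--     n_electrons : int
--         Number of electrons in this orbital
--
--     Returns:
--     --------
--     list : List of tuples (n_up, n_down) for each orbital
--     """
--     orbital_type = get_orbital_type(orbital)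
--
--     # Number of spatial orbitals
--     n_orbitals = {
--         's': 1,  # m_l = 0
--         'p': 3,  # m_l = -1, 0, +1
--         'd': 5,  # m_l = -2, -1, 0, +1, +2
--         'f': 7   # m_l = -3, -2, -1, 0, +1, +2, +3
--     }[orbital_type]
--
--     # Initialize empty orbitals
--     boxes = [[0, 0] for _ in range(n_orbitals)]  # [spin_up, spin_down]
--
--     electrons_remaining = n_electrons
--
--     # Hund's Rule 1: Fill all orbitals singly with parallel spins first
--     for i in range(n_orbitals):
--         if electrons_remaining > 0:
--             boxes[i][0] = 1  # Spin up
--             electrons_remaining -= 1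
--         else:
--             break
--
--     # Now pair electrons (spin down)
--     for i in range(n_orbitals):
--         if electrons_remaining > 0:
--             boxes[i][1] = 1  # Spin down
--             electrons_remaining -= 1
--         else:
--             break
--
--     return boxes
-- ===== SOURCE B (Python) =====
-- def get_orbital_box_diagram(orbital, n_electrons):
--     n_orbitals = {'s': 1, 'p': 3, 'd': 5, 'f': 7}[orbital[-1]]
--     n_up = max(0, min(n_electrons, n_orbitals))
--     n_down = max(0, min(n_electrons - n_orbitals, n_orbitals))
--     return [[1 if i < n_up else 0, 1 if i < n_down else 0]
--             for i in range(n_orbitals)]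
-- ===== Notes on version B (the rewrite author's own statement) =====
-- stated objective: simpler
-- what changed: Replaces A's two sequential break-out fill loops over mutable boxes with up-front computation of the spin-up/spin-down totals (clamped min/max) and a single comprehension that emits each box directly.
import Mathlib
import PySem

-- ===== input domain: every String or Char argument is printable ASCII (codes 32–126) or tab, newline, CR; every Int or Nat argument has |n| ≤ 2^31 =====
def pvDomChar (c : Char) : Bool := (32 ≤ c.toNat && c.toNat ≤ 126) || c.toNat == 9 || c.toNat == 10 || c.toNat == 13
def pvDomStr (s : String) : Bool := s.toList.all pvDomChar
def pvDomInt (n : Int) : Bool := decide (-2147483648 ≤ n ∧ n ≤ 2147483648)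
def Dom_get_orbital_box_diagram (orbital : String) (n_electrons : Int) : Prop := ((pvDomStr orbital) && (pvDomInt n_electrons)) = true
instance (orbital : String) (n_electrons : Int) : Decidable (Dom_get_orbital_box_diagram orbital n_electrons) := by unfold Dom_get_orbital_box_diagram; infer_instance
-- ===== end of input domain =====

-- B replaces A's two sequential break-out fill loops by computing the up/down totals
-- up front and emitting each box directly in one pass (objective: simpler).

-- ===== PORT A =====
-- orbital_str[-1]; Python returns a 1-char string, ported as the Char (none = IndexError)
def get_orbital_type (orbital_str : String) : Option Char :=
  PySem.Str.pyGet? orbital_str (-1)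

-- the {'s':1,'p':3,'d':5,'f':7} dict literal
def pvOrbDict : PySem.Dict Char Int :=
  PySem.Dict.ofList [('s', 1), ('p', 3), ('d', 5), ('f', 7)]

-- first loop: for i in range(n_orbitals): if rem>0: boxes[i][0]=1; rem-=1 else break
-- (returns the boxes together with electrons_remaining)
def pvFillUp : List (List Int) → Int → List (List Int) × Int
  | [], rem => ([], rem)
  | b :: bs, rem =>
    if rem > 0 then
      let r := pvFillUp bs (rem - 1)
      (b.set 0 1 :: r.1, r.2)
    else (b :: bs, rem)

-- second loop: same shape, setting boxes[i][1]
def pvFillDown : List (List Int) → Int → List (List Int) × Int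
  | [], rem => ([], rem)
  | b :: bs, rem =>
    if rem > 0 then
      let r := pvFillDown bs (rem - 1)
      (b.set 1 1 :: r.1, r.2)
    else (b :: bs, rem)

def get_orbital_box_diagram (orbital : String) (n_electrons : Int) : List (List Int) :=
  match get_orbital_type orbital with
  | none => []                               -- IndexError: outside Pre_
  | some c =>
    match pvOrbDict.get? c with
    | none => []                             -- KeyError: outside Pre_
    | some n_orbitals =>
      let boxes := (PySem.List.pyRange 0 n_orbitals 1).map (fun _ => ([0, 0] : List Int))
      let r1 := pvFillUp boxes n_electrons
      (pvFillDown r1.1 r1.2).1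

-- ===== PORT B =====
def get_orbital_box_diagram_alt (orbital : String) (n_electrons : Int) : List (List Int) :=
  match PySem.Str.pyGet? orbital (-1) with
  | none => []                               -- IndexError: outside Pre_
  | some c =>
    match (PySem.Dict.ofList [('s', (1:Int)), ('p', 3), ('d', 5), ('f', 7)]).get? c with
    | none => []                             -- KeyError: outside Pre_
    | some n_orbitals =>
      let n_up := max 0 (min n_electrons n_orbitals)
      let n_down := max 0 (min (n_electrons - n_orbitals) n_orbitals)
      (PySem.List.pyRange 0 n_orbitals 1).map
        (fun i => [if i < n_up then 1 else 0, if i < n_down then 1 else 0])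

-- ===== PRECONDITION & SPEC =====
-- Pre_ excludes only inputs where A raises: IndexError on the empty string and
-- KeyError when the last character is not one of 's','p','d','f'.
def Pre_get_orbital_box_diagram (orbital : String) (n_electrons : Int) : Prop :=
  orbital.toList.getLast? = some 's' ∨ orbital.toList.getLast? = some 'p' ∨
  orbital.toList.getLast? = some 'd' ∨ orbital.toList.getLast? = some 'f'
instance (orbital : String) (n_electrons : Int) : Decidable (Pre_get_orbital_box_diagram orbital n_electrons) := by unfold Pre_get_orbital_box_diagram; infer_instance

def pvWitness_get_orbital_box_diagram : String × Int := ("2p", 4)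

def Spec_get_orbital_box_diagram (orbital : String) (n_electrons : Int) (out : List (List Int)) : Prop := out = get_orbital_box_diagram_alt orbital n_electrons
instance (orbital : String) (n_electrons : Int) (out : List (List Int)) : Decidable (Spec_get_orbital_box_diagram orbital n_electrons out) := by unfold Spec_get_orbital_box_diagram; infer_instance

-- ===== CLAIM (what is proved, stated in full; the proofs are below) =====
def Claim_equal_get_orbital_box_diagram : Prop := ∀ (orbital : String) (n_electrons : Int), Dom_get_orbital_box_diagram orbital n_electrons → Pre_get_orbital_box_diagram orbital n_electrons → Spec_get_orbital_box_diagram orbital n_electrons (get_orbital_box_diagram orbital n_electrons)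

-- ===== LEMMAS AND PROOFS =====

-- proof-only shapes of the intermediate box lists
def pvUpB : Nat → Int → List (List Int)
  | 0, _ => []
  | k+1, rem => (if rem > 0 then [1, 0] else [0, 0]) :: pvUpB k (rem - 1)

def pvDnB : Nat → Int → Int → List (List Int)
  | 0, _, _ => []
  | k+1, u, d => [if u > 0 then 1 else 0, if d > 0 then 1 else 0] :: pvDnB k (u - 1) (d - 1)

theorem pvUpB_nonpos (k : Nat) (rem : Int) (h : rem ≤ 0) :
    pvUpB k rem = List.replicate k ([0, 0] : List Int) := by
  induction k generalizing rem with
  | zero => rfl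
  | succ k ih => simp [pvUpB, List.replicate_succ, ih (rem - 1) (by omega), (show ¬ rem > 0 by omega)]

theorem pvDnB_nonpos (k : Nat) (u d : Int) (h : d ≤ 0) :
    pvDnB k u d = pvUpB k u := by
  induction k generalizing u d with
  | zero => rfl
  | succ k ih =>
    simp only [pvDnB, pvUpB, ih (u - 1) (d - 1) (by omega)]
    congr 1
    split_ifs with h1 h2 <;> first | rfl | omega

theorem pvFillUp_spec (k : Nat) (rem : Int) :
    pvFillUp (List.replicate k ([0, 0] : List Int)) rem =
      (pvUpB k rem, rem - max 0 (min rem (k : Int))) := by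
  induction k generalizing rem with
  | zero => simp only [List.replicate, pvFillUp, pvUpB]; congr 1; omega
  | succ k ih =>
    rw [List.replicate_succ]
    simp only [pvFillUp]
    split_ifs with h
    · rw [ih (rem - 1)]
      simp only [pvUpB, if_pos h, List.set]
      refine Prod.ext rfl ?_
      simp only []
      push_cast
      omega
    · rw [pvUpB_nonpos (k + 1) rem (by omega), List.replicate_succ]
      refine Prod.ext rfl ?_
      simp only []
      push_cast
      omega

theorem pvFillDown_spec (k : Nat) (u d : Int) :
    (pvFillDown (pvUpB k u) d).1 = pvDnB k u d := by
  induction k generalizing u d with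
  | zero => rfl
  | succ k ih =>
    simp only [pvUpB, pvFillDown]
    split_ifs with hd hu
    · simp [pvDnB, ih (u - 1) (d - 1), hd, hu]
    · simp [pvDnB, ih (u - 1) (d - 1), hd, hu]
    all_goals
      simp only [pvDnB, pvDnB_nonpos k (u - 1) (d - 1) (by omega)]
      congr 1
      split_ifs <;> rfl

theorem pvDnB_eq_map (k : Nat) (a u d : Int) :
    pvDnB k u d = (PySem.List.pyRange a (a + (k : Int)) 1).map
      (fun i => [if i - a < u then 1 else 0, if i - a < d then 1 else 0]) := by
  induction k generalizing a u d with
  | zero => rw [PySem.List.pyRange_one_eq_nil (by omega)]; rfl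
  | succ k ih =>
    rw [PySem.List.pyRange_one_cons (by push_cast; omega), List.map_cons]
    simp only [pvDnB]
    refine List.cons_eq_cons.mpr ⟨?_, ?_⟩
    · split_ifs <;> first | rfl | (exfalso; omega)
    · rw [show a + ((k + 1 : Nat) : Int) = (a + 1) + (k : Int) from by push_cast; ring,
        ih (a + 1) (u - 1) (d - 1)]
      refine List.map_congr_left (fun i _ => ?_)
      split_ifs <;> first | rfl | (exfalso; omega)

-- core equality for a concrete orbital count k
theorem pv_core (k : Nat) (n : Int) :
    (pvFillDown (pvFillUp ((PySem.List.pyRange 0 (k : Int) 1).map (fun _ => ([0, 0] : List Int))) n).1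
        (pvFillUp ((PySem.List.pyRange 0 (k : Int) 1).map (fun _ => ([0, 0] : List Int))) n).2).1 =
      (PySem.List.pyRange 0 (k : Int) 1).map
        (fun i => [if i < max 0 (min n (k : Int)) then 1 else 0,
                   if i < max 0 (min (n - (k : Int)) (k : Int)) then 1 else 0]) := by
  have hinit : (PySem.List.pyRange 0 (k : Int) 1).map (fun _ => ([0, 0] : List Int)) =
      List.replicate k ([0, 0] : List Int) := by
    rw [List.map_const', PySem.List.length_pyRange_one]
    norm_num
  rw [hinit, pvFillUp_spec k n, pvFillDown_spec k n,
    pvDnB_eq_map k 0 n (n - max 0 (min n (k : Int)))]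
  rw [show (0 : Int) + (k : Int) = (k : Int) from by ring]
  refine List.map_congr_left (fun i hi => ?_)
  have hik : 0 ≤ i ∧ i < (k : Int) := (PySem.List.mem_pyRange_one.mp hi).imp id id
  split_ifs <;> first | rfl | (exfalso; omega)

-- ===== VERDICT (by name: the statement is the Claim_ definition above) =====
theorem get_orbital_box_diagram_spec : Claim_equal_get_orbital_box_diagram := by
  intro orbital n _ hpre
  unfold Spec_get_orbital_box_diagram get_orbital_box_diagram get_orbital_box_diagram_alt
    get_orbital_type
  have hlast : PySem.Str.pyGet? orbital (-1) = orbital.toList.getLast? := by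
    simp [PySem.Str.pyGet?, PySem.List.pyGet?_neg_one]
  rcases hpre with h | h | h | h
  · rw [hlast, h]
    exact (by simpa using pv_core 1 n)
  · rw [hlast, h]
    exact (by simpa using pv_core 3 n)
  · rw [hlast, h]
    exact (by simpa using pv_core 5 n)
  · rw [hlast, h]
    exact (by simpa using pv_core 7 n)
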